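-- pv_equiv track=rewrite | github.com/ewhacote/ewhaCote_minju | 0728_점 찍기.py | solution
-- ===== SOURCE A (Python) =====
-- def solution(k, d):
--     count = 0
--     coordinates = []
--     idx = 0
--     while (idx * k) ** 2 <= d ** 2:
--         coordinates.append(idx * k)
--         idx += 1
--
--     high = len(coordinates) - 1
--     low = 0
--     while low < len(coordinates):
--         if coordinates[low] ** 2 + coordinates[high] ** 2 > d ** 2:
--             high -= 1
--         else:
--             count += (high + 1)
--             low += 1
--     return count
-- ===== SOURCE B (Python) =====
-- import math
--
-- def solution(k, d):
--     # Closed-form per-column count: for each x = i*k with x*x <= d*d,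
--     # the admissible y are the multiples j*k with j*j*k*k <= d*d - x*x,
--     # i.e. j <= isqrt((d*d - x*x) // (k*k)); that is isqrt(rem // kk) + 1 points.
--     t = d * d
--     kk = k * k
--     total = 0
--     i = 0
--     while i * i * kk <= t:
--         total += math.isqrt((t - i * i * kk) // kk) + 1
--         i += 1
--     return total
-- ===== Notes on version B (the rewrite author's own statement) =====
-- stated objective: simpler
-- what changed: Replaces A's materialised coordinate list plus two-pointer scan with a single loop that counts each column in closed form via math.isqrt((d*d - x*x)//(k*k)) + 1.
import Mathlib
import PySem

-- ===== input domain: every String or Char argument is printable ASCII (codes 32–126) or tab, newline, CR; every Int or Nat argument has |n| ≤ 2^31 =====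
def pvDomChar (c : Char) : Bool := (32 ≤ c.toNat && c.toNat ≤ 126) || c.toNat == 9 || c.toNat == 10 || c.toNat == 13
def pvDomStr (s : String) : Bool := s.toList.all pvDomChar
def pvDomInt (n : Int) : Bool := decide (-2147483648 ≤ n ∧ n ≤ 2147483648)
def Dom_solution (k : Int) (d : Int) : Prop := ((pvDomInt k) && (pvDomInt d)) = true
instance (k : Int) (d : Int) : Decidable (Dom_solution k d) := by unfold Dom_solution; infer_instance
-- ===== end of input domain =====

-- B replaces A's coordinate list + two-pointer scan by one loop counting each column
-- in closed form with an integer square root (same number of passes, no list, no second pointer).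

-- ===== PORT A =====
-- first while loop: append idx*k while (idx*k)**2 <= d**2 (fuel only totalises the k = 0 divergence)
-- Python's list is a dynamic array: Array with .push is the O(1)-append counterpart of list.append
def pyBuild (k : Int) (d : Int) (idx : Int) (acc : Array Int) (fuel : Nat) : Array Int :=
  match fuel with
  | 0 => acc
  | f + 1 =>
    if (idx * k) ^ 2 ≤ d ^ 2 then pyBuild k d (idx + 1) (acc.push (idx * k)) f else acc

-- second while loop: the two-pointer scan. Indexing is exact here: under Pre_ both indices are
-- proved nonnegative and in range, so Python's negative-index and IndexError cases never occur
-- (.toNat/.getD 0 only totalise them).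
def pyScan (coords : Array Int) (d : Int) (low : Int) (high : Int) (count : Int) (fuel : Nat) : Int :=
  match fuel with
  | 0 => count
  | f + 1 =>
    if low < (coords.size : Int) then
      if (coords[low.toNat]?.getD 0) ^ 2 + (coords[high.toNat]?.getD 0) ^ 2 > d ^ 2 then
        pyScan coords d low (high - 1) count f
      else
        pyScan coords d (low + 1) high (count + (high + 1)) f
    else count

-- 'coordinates' local variable, named as a helper so the scan sees the same list
def pyCoords (k : Int) (d : Int) : Array Int :=
  pyBuild k d 0 #[] (if k == 0 then 0 else d.natAbs + 2)

def solution (k : Int) (d : Int) : Int :=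
  pyScan (pyCoords k d) d 0 (((pyCoords k d).size : Int) - 1) 0 (2 * (pyCoords k d).size + 1)

-- ===== PORT B =====
def altLoop (kk : Int) (t : Int) (i : Int) (total : Int) (fuel : Nat) : Int :=
  match fuel with
  | 0 => total
  | f + 1 =>
    if i * i * kk ≤ t then
      altLoop kk t (i + 1)
        (total + ((Nat.sqrt ((PySem.Int.floordiv (t - i * i * kk) kk).toNat) : Int) + 1)) f
    else total

def solution_alt (k : Int) (d : Int) : Int :=
  altLoop (k * k) (d * d) 0 0 (if k == 0 then 0 else d.natAbs + 2)

-- ===== PRECONDITION & SPEC =====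
-- Pre_ excludes exactly k = 0, on which A's first while loop never terminates (A returns on every other input).
def Pre_solution (k : Int) (d : Int) : Prop := k ≠ 0
instance (k : Int) (d : Int) : Decidable (Pre_solution k d) := by unfold Pre_solution; infer_instance
def pvWitness_solution : Int × Int := (2, 10)

def Spec_solution (k : Int) (d : Int) (out : Int) : Prop := out = solution_alt k d
instance (k : Int) (d : Int) (out : Int) : Decidable (Spec_solution k d out) := by unfold Spec_solution; infer_instance

-- ===== CLAIM (what is proved, stated in full; the proofs are below) =====
def Claim_equal_solution : Prop := ∀ (k : Int) (d : Int), Dom_solution k d → Pre_solution k d → Spec_solution k d (solution k d)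

-- ===== LEMMAS AND PROOFS =====

-- number of admissible y-values in column x = m*k; nCols = number of columns
def Fcol (k : Int) (d : Int) (m : ℕ) : ℕ :=
  Nat.sqrt ((PySem.Int.floordiv (d * d - (m : Int) * (m : Int) * (k * k)) (k * k)).toNat) + 1
def nCols (k : Int) (d : Int) : ℕ := Fcol k d 0

theorem lt_Fcol_iff (k d : Int) (hk : k ≠ 0) (m j : ℕ)
    (hm : (m : Int) * m * (k * k) ≤ d * d) :
    j < Fcol k d m ↔ (j : Int) * j * (k * k) ≤ d * d - (m : Int) * m * (k * k) := by
  have hK : (0 : Int) < k * k := mul_self_pos.mpr hk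
  have h0 : (0 : Int) ≤ PySem.Int.floordiv (d * d - (m : Int) * m * (k * k)) (k * k) := by
    rw [PySem.Int.le_floordiv_iff_mul_le hK]; linarith
  unfold Fcol
  rw [Nat.lt_succ_iff, Nat.le_sqrt, Int.le_toNat h0, PySem.Int.le_floordiv_iff_mul_le hK]
  push_cast
  constructor <;> intro h <;> linarith

theorem lt_nCols_iff (k d : Int) (hk : k ≠ 0) (m : ℕ) :
    m < nCols k d ↔ (m : Int) * m * (k * k) ≤ d * d := by
  have h0 : ((0 : ℕ) : Int) * (0 : ℕ) * (k * k) ≤ d * d := by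
    push_cast; nlinarith [sq_nonneg d]
  have := lt_Fcol_iff k d hk 0 m h0
  simpa [nCols] using this

theorem Fcol_pos (k d : Int) (m : ℕ) : 0 < Fcol k d m := Nat.succ_pos _

theorem nCols_pos (k d : Int) : 0 < nCols k d := Fcol_pos k d 0

theorem Fcol_anti (k d : Int) (hk : k ≠ 0) (m m' : ℕ) (hle : m ≤ m') (hm' : m' < nCols k d) :
    Fcol k d m' ≤ Fcol k d m := by
  have hm'2 := (lt_nCols_iff k d hk m').mp hm'
  have hcast : (m : Int) ≤ (m' : Int) := by exact_mod_cast hle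
  have hmono : (m : Int) * m * (k * k) ≤ (m' : Int) * m' * (k * k) := by
    have h0 : (0 : Int) ≤ (m : Int) := by positivity
    have hKnn : (0 : Int) ≤ k * k := mul_self_nonneg k
    have := mul_le_mul hcast hcast h0 (le_trans h0 hcast)
    exact mul_le_mul_of_nonneg_right this hKnn
  have hm2 : (m : Int) * m * (k * k) ≤ d * d := le_trans hmono hm'2
  have hj : Fcol k d m' - 1 < Fcol k d m' := by have := Fcol_pos k d m'; omega
  have h1 := (lt_Fcol_iff k d hk m' _ hm'2).mp hj
  have h2 : ((Fcol k d m' - 1 : ℕ) : Int) * (Fcol k d m' - 1 : ℕ) * (k * k) ≤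
      d * d - (m : Int) * m * (k * k) := by linarith
  have := (lt_Fcol_iff k d hk m _ hm2).mpr h2
  omega

theorem nCols_le (k d : Int) (hk : k ≠ 0) : nCols k d ≤ d.natAbs + 1 := by
  have hn := nCols_pos k d
  have h1 := (lt_nCols_iff k d hk (nCols k d - 1)).mp (by omega)
  have hK : (1 : Int) ≤ k * k := mul_self_pos.mpr hk
  set a := nCols k d - 1 with ha
  have h2 : (a : Int) * a ≤ d * d := by nlinarith
  have hd : (d.natAbs : Int) * d.natAbs = d * d := by exact_mod_cast Int.natAbs_mul_self
  have h2' : a * a ≤ d.natAbs * d.natAbs := by exact_mod_cast hd ▸ h2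
  have h3 : a ≤ d.natAbs := by
    by_contra hc
    have hlt : d.natAbs < a := by omega
    have := Nat.mul_lt_mul_of_lt_of_le hlt (le_of_lt hlt) (by omega)
    omega
  omega

theorem pyBuild_eq (k d : Int) (hk : k ≠ 0) :
    ∀ (fuel : Nat) (m : ℕ) (acc : Array Int), m ≤ nCols k d → nCols k d - m + 1 ≤ fuel →
    (pyBuild k d (m : Int) acc fuel).toList =
      acc.toList ++ (List.range (nCols k d - m)).map (fun i => ((m + i : ℕ) : Int) * k) := by
  intro fuel
  induction fuel with
  | zero => intro m _ _ hf; omega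
  | succ f ih =>
    intro m acc hm hf
    by_cases hlt : m < nCols k d
    · have hcond : ((m : Int) * k) ^ 2 ≤ d ^ 2 := by
        have := (lt_nCols_iff k d hk m).mp hlt
        nlinarith
      have hs : nCols k d - m = (nCols k d - (m + 1)) + 1 := by omega
      rw [pyBuild, if_pos hcond]
      have hcast : (m : Int) + 1 = ((m + 1 : ℕ) : Int) := by push_cast; ring
      rw [hcast, ih (m + 1) _ (by omega) (by omega), hs, List.range_succ_eq_map]
      simp only [List.map_cons, List.map_map, Nat.add_zero, List.append_assoc,
        List.singleton_append, Array.toList_push]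
      congr 2
      apply List.map_congr_left
      intro i _
      simp only [Function.comp_apply, Nat.succ_eq_add_one]
      push_cast
      ring
    · have hm' : m = nCols k d := by omega
      have hcond : ¬ ((m : Int) * k) ^ 2 ≤ d ^ 2 := by
        intro hle
        have : (m : Int) * m * (k * k) ≤ d * d := by nlinarith
        exact absurd ((lt_nCols_iff k d hk m).mpr this) (by omega)
      rw [pyBuild, if_neg hcond, hm']
      simp

theorem coords_get (k d : Int) (coords : Array Int)
    (hc : coords.toList = (List.range (nCols k d)).map (fun j => ((j : ℕ) : Int) * k))
    (i : ℕ) (hi : i < nCols k d) :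
    (coords[((i : Int).toNat)]?.getD 0) = (i : Int) * k := by
  rw [Int.toNat_natCast, ← Array.getElem?_toList, hc]
  simp [hi]

theorem pyScan_eq (k d : Int) (hk : k ≠ 0) (coords : Array Int)
    (hc : coords.toList = (List.range (nCols k d)).map (fun j => ((j : ℕ) : Int) * k)) :
    ∀ (fuel : Nat) (l h : ℕ) (count : Int), l ≤ nCols k d →
    (l < nCols k d → Fcol k d l ≤ h + 1 ∧ h < nCols k d) →
    nCols k d - l + h + 1 ≤ fuel →
    pyScan coords d (l : Int) (h : Int) count fuel
      = count + ((∑ i ∈ Finset.Ico l (nCols k d), Fcol k d i : ℕ) : Int) := by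
  have hsize : coords.size = nCols k d := by
    rw [← Array.length_toList, hc]; simp
  intro fuel
  induction fuel with
  | zero => intro l h count _ _ hf; omega
  | succ f ih =>
    intro l h count hl hinv hf
    by_cases hlt : l < nCols k d
    · obtain ⟨hFl, hhn⟩ := hinv hlt
      have hml := (lt_nCols_iff k d hk l).mp hlt
      have hcond : ((l : Int) < ((coords.size : ℕ) : Int)) := by
        rw [hsize]; exact_mod_cast hlt
      rw [pyScan, if_pos hcond, coords_get k d coords hc l hlt, coords_get k d coords hc h hhn]
      have hchar : ((l : Int) * k) ^ 2 + ((h : Int) * k) ^ 2 > d ^ 2 ↔ Fcol k d l ≤ h := by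
        constructor
        · intro hgt
          by_contra hcon
          have hlt2 : h < Fcol k d l := by omega
          have := (lt_Fcol_iff k d hk l h hml).mp hlt2
          nlinarith
        · intro hge
          have hnlt : ¬ h < Fcol k d l := by omega
          have h2 : ¬ ((h : Int) * h * (k * k) ≤ d * d - (l : Int) * l * (k * k)) :=
            fun hc => hnlt ((lt_Fcol_iff k d hk l h hml).mpr hc)
          have := lt_of_not_ge h2
          nlinarith
      by_cases hb : Fcol k d l ≤ h
      · rw [if_pos (hchar.mpr hb)]
        have hpos := Fcol_pos k d l
        have hh : 1 ≤ h := by omega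
        have hcast : (h : Int) - 1 = ((h - 1 : ℕ) : Int) := by push_cast [hh]; ring
        rw [hcast]
        exact ih l (h - 1) count hl (fun _ => ⟨by omega, by omega⟩) (by omega)
      · rw [if_neg (fun hc => hb (hchar.mp hc))]
        have heq : h + 1 = Fcol k d l := by omega
        have hcast : (l : Int) + 1 = ((l + 1 : ℕ) : Int) := by push_cast; ring
        rw [hcast]
        rw [ih (l + 1) h (count + ((h : Int) + 1)) (by omega)
          (fun hlt2 => ⟨le_trans (Fcol_anti k d hk l (l + 1) (by omega) hlt2) (by omega), hhn⟩)
          (by omega)]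
        rw [Finset.sum_eq_sum_Ico_succ_bot hlt]
        push_cast
        have : (h : Int) + 1 = (Fcol k d l : Int) := by exact_mod_cast congrArg (Nat.cast : ℕ → Int) heq
        linarith
    · have hl' : l = nCols k d := by omega
      have hcond : ¬ ((l : Int) < ((coords.size : ℕ) : Int)) := by
        rw [hsize]
        simp only [not_lt]
        omega
      rw [pyScan, if_neg hcond, hl']
      simp

theorem altLoop_eq (k d : Int) (hk : k ≠ 0) :
    ∀ (fuel : Nat) (m : ℕ) (total : Int), m ≤ nCols k d → nCols k d - m + 1 ≤ fuel →
    altLoop (k * k) (d * d) (m : Int) total fuel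
      = total + ((∑ i ∈ Finset.Ico m (nCols k d), Fcol k d i : ℕ) : Int) := by
  intro fuel
  induction fuel with
  | zero => intro m _ _ hf; omega
  | succ f ih =>
    intro m total hm hf
    by_cases hlt : m < nCols k d
    · have hcond : (m : Int) * m * (k * k) ≤ d * d := (lt_nCols_iff k d hk m).mp hlt
      rw [altLoop, if_pos hcond]
      have hcast : (m : Int) + 1 = ((m + 1 : ℕ) : Int) := by push_cast; ring
      rw [hcast, ih (m + 1) _ (by omega) (by omega), Finset.sum_eq_sum_Ico_succ_bot hlt]
      have hF : ((Nat.sqrt ((PySem.Int.floordiv (d * d - (m : Int) * m * (k * k)) (k * k)).toNat) : ℕ) : Int) + 1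
          = ((Fcol k d m : ℕ) : Int) := by
        unfold Fcol; push_cast; ring
      push_cast at hF ⊢
      linarith
    · have hcond : ¬ (m : Int) * m * (k * k) ≤ d * d := fun hc =>
        absurd ((lt_nCols_iff k d hk m).mpr hc) (by omega)
      rw [altLoop, if_neg hcond]
      have : m = nCols k d := by omega
      rw [this]
      simp

-- ===== VERDICT (by name: the statement is the Claim_ definition above) =====
theorem solution_spec : Claim_equal_solution := by
  intro k d _ hk
  unfold Spec_solution solution solution_alt
  have hn1 := nCols_pos k d
  have hle := nCols_le k d hk
  have hk0 : (k == 0) = false := by simpa using hk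
  have hb : (pyCoords k d).toList = (List.range (nCols k d)).map (fun j => ((j : ℕ) : Int) * k) := by
    unfold pyCoords
    rw [hk0, if_neg (by simp), show ((0 : Int)) = ((0 : ℕ) : Int) from rfl]
    have := pyBuild_eq k d hk (d.natAbs + 2) 0 #[] (by omega) (by omega)
    simpa using this
  have hsize : (pyCoords k d).size = nCols k d := by
    rw [← Array.length_toList, hb]; simp
  rw [hsize]
  have hcast : ((nCols k d : ℕ) : Int) - 1 = ((nCols k d - 1 : ℕ) : Int) := by omega
  rw [hcast]
  have h1 := pyScan_eq k d hk (pyCoords k d) hb (2 * nCols k d + 1) 0 (nCols k d - 1) 0 (by omega)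
    (fun _ => ⟨by have hF0 : Fcol k d 0 = nCols k d := rfl; omega, by omega⟩) (by omega)
  have h2 := altLoop_eq k d hk (d.natAbs + 2) 0 0 (by omega) (by omega)
  rw [hk0, if_neg (by simp)]
  simp only [Nat.cast_zero] at h1 h2
  rw [h1, h2]
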